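-- pv_equiv track=rewrite | github.com/PupilTong/EC602 | midtermone/midtermone.py | queenmoves
-- ===== SOURCE A (Python) =====
-- def queenmoves(board):
--     """board is 8 line string with representing a chessboard
--     with a single queen on the board, marked with the letter Q
--
--     Return a new chess board with the same format, but with
--     all places on the chess board that the queen can move to
--     marked with an "X"
--
--     A queen can move diagonally, vertically, or horizontally
--     an arbitrary number of spaces."""
--     s=board.split()
--     col=0
--     row=0
--     result=""
--     for line in s:
--         if(line!="********"):
--             for c in line:
--                 if(c=='Q'):
--                     break
--                 col = col + 1
--             break
--         row = row+1
--     for r in range(8):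
--         for c in range(8):
--             if(r==row and c==col):
--                 result = result + "Q"
--             elif(r==row or c == col):
--                 result = result + "X"
--             elif(abs(r-row)==abs(c-col)):
--                 result = result +"X"
--             else:
--                 result = result+"*"
--         if(r!=7):
--             result = result + "\n"
--
--     return result
-- ===== SOURCE B (Python) =====
-- def queenmoves(board):
--     """Same result as A: locate the queen by parsing the board, then mark the
--     attacked squares by walking the queen's rank, file and both diagonals on a
--     mutable grid, instead of testing every cell with the abs() closed form."""
--     lines = board.split()
--     row = next((i for i, line in enumerate(lines) if line != "********"),
--                len(lines))
--     if row < len(lines):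
--         line = lines[row]
--         col = next((i for i, ch in enumerate(line) if ch == 'Q'), len(line))
--     else:
--         col = 0
--     grid = [['*'] * 8 for _ in range(8)]
--
--     def mark(r, c):
--         if 0 <= r < 8 and 0 <= c < 8:
--             grid[r][c] = 'X'
--
--     for i in range(8):
--         mark(i, col)              # the queen's file
--         mark(row, i)              # the queen's rank
--         mark(i, i - row + col)    # the "\" diagonal
--         mark(row + col - i, i)    # the "/" diagonal
--     if 0 <= row < 8 and 0 <= col < 8:
--         grid[row][col] = 'Q'
--     return "\n".join("".join(r) for r in grid)
-- ===== Notes on version B (the rewrite author's own statement) =====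
-- stated objective: alternative
-- what changed: A tests every one of the 64 cells with the r==row/c==col/abs(r-row)==abs(c-col) closed form while appending to a string; B locates the queen with next(...) generators and then marks a mutable 8x8 grid by walking the queen's rank, file and both diagonals, finally joining the rows.
import Mathlib
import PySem

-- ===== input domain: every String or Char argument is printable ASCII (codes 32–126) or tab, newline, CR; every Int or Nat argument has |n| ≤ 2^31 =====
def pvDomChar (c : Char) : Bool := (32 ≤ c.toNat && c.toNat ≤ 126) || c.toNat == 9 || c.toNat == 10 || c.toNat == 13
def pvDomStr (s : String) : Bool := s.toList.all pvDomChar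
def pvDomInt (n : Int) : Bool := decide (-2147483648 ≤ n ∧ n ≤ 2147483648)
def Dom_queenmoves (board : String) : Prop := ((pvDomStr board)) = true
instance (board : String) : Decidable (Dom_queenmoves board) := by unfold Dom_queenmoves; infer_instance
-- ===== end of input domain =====

-- B marks the queen's rank/file/diagonals on a mutable grid instead of A's per-cell abs() closed-form test; alternative decomposition, same cost.

-- ===== PORT A =====
-- inner loop 'for c in line: if c == "Q": break; col = col + 1'
def qmColA : List Char → Int → Int
  | [], col => col
  | ch :: cs, col => if ch = 'Q' then col else qmColA cs (col + 1)

-- outer loop 'for line in s: if line != "********": <inner>; break  else: row = row + 1'; returns (col, row)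
def qmFindA : List String → Int → Int → Int × Int
  | [], col, row => (col, row)
  | line :: rest, col, row =>
    if line ≠ "********" then (qmColA line.toList col, row)
    else qmFindA rest col (row + 1)

def queenmoves (board : String) : String :=
  let s := PySem.Str.split₀ board
  let cr := qmFindA s 0 0
  let col := cr.1
  let row := cr.2
  let result : List Char := (PySem.List.pyRange 0 8 1).foldl (fun result r =>
    let result := (PySem.List.pyRange 0 8 1).foldl (fun result c =>
      if r = row ∧ c = col then result ++ ['Q']
      else if r = row ∨ c = col then result ++ ['X']
      else if (r - row).natAbs = (c - col).natAbs then result ++ ['X']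
      else result ++ ['*']) result
    if r ≠ 7 then result ++ ['\n'] else result) []
  String.ofList result

-- ===== PORT B =====
-- 'def mark(r, c): if 0 <= r < 8 and 0 <= c < 8: grid[r][c] = "X"'
def qmMark (grid : List (List Char)) (r c : Int) : List (List Char) :=
  if 0 ≤ r ∧ r < 8 ∧ 0 ≤ c ∧ c < 8 then
    grid.modify r.toNat (fun line => line.set c.toNat 'X')
  else grid

def queenmoves_alt (board : String) : String :=
  let lines := PySem.Str.split₀ board
  -- row = next((i for i, line in enumerate(lines) if line != "********"), len(lines))
  let row : Int := ((lines.findIdx? (fun line => line ≠ "********")).getD lines.length : Nat)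
  -- col = next((i for i, ch in enumerate(line) if ch == 'Q'), len(line)) for line = lines[row] if row < len(lines), else 0
  let col : Int :=
    match PySem.List.pyGet? lines row with
    | some line => ((line.toList.findIdx? (fun ch => ch = 'Q')).getD line.toList.length : Nat)
    | none => 0
  let grid : List (List Char) := List.replicate 8 (List.replicate 8 '*')
  let grid := (PySem.List.pyRange 0 8 1).foldl (fun g i =>
    qmMark (qmMark (qmMark (qmMark g i col) row i) i (i - row + col)) (row + col - i) i) grid
  let grid := if 0 ≤ row ∧ row < 8 ∧ 0 ≤ col ∧ col < 8 then
      grid.modify row.toNat (fun line => line.set col.toNat 'Q')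
    else grid
  String.ofList (PySem.Chars.join ['\n'] grid)

-- ===== PRECONDITION & SPEC =====
def Spec_queenmoves (board : String) (out : String) : Prop := out = queenmoves_alt board
instance (board : String) (out : String) : Decidable (Spec_queenmoves board out) := by unfold Spec_queenmoves; infer_instance

-- ===== CLAIM (what is proved, stated in full; the proofs are below) =====
def Claim_equal_queenmoves : Prop := ∀ (board : String), Dom_queenmoves board → Spec_queenmoves board (queenmoves board)

-- ===== LEMMAS AND PROOFS =====

-- A's per-cell decision, as a character
def qmCharA (row col r c : Int) : Char :=
  if r = row ∧ c = col then 'Q'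
  else if r = row ∨ c = col then 'X'
  else if (r - row).natAbs = (c - col).natAbs then 'X'
  else '*'

-- "iteration i of B's marking loop paints cell (a, b)"
def qmHit (row col i : Int) (a b : Nat) : Bool :=
  decide ((i = (a : Int) ∧ col = (b : Int)) ∨ (row = (a : Int) ∧ i = (b : Int)) ∨
    (i = (a : Int) ∧ i - row + col = (b : Int)) ∨ (row + col - i = (a : Int) ∧ i = (b : Int)))

-- B's final grid, cell by cell
def qmCharB (row col : Int) (a b : Nat) : Char :=
  if 0 ≤ row ∧ row < 8 ∧ 0 ≤ col ∧ col < 8 ∧ row = (a : Int) ∧ col = (b : Int) then 'Q'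
  else if ([0, 1, 2, 3, 4, 5, 6, 7] : List Int).any (fun i => qmHit row col i a b) then 'X' else '*'

-- B's final grid as one zeta-reduced term
def qmGridB (row col : Int) : List (List Char) :=
  if 0 ≤ row ∧ row < 8 ∧ 0 ≤ col ∧ col < 8 then
    ((PySem.List.pyRange 0 8 1).foldl (fun g i =>
      qmMark (qmMark (qmMark (qmMark g i col) row i) i (i - row + col)) (row + col - i) i)
      (List.replicate 8 (List.replicate 8 '*'))).modify row.toNat (fun line => line.set col.toNat 'Q')
  else (PySem.List.pyRange 0 8 1).foldl (fun g i =>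
      qmMark (qmMark (qmMark (qmMark g i col) row i) i (i - row + col)) (row + col - i) i)
      (List.replicate 8 (List.replicate 8 '*'))

def qmShape (g : List (List Char)) : Prop :=
  g.length = 8 ∧ ∀ (a : Nat) (h : a < g.length), g[a].length = 8

def qmCell (g : List (List Char)) (a b : Nat) : Char := (g.getD a []).getD b ' '

lemma qmShape_modify (g : List (List Char)) (hs : qmShape g) (r c : Int) (ch : Char) :
    qmShape (if 0 ≤ r ∧ r < 8 ∧ 0 ≤ c ∧ c < 8 then
      g.modify r.toNat (fun line => line.set c.toNat ch) else g) := by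
  split_ifs with hg
  · refine ⟨by simp [List.length_modify, hs.1], ?_⟩
    intro a h
    rw [List.length_modify] at h
    rw [List.getElem_modify]
    split_ifs
    · simp [List.length_set, hs.2 a h]
    · exact hs.2 a h
  · exact hs

lemma qmCell_modify (g : List (List Char)) (hs : qmShape g) (r c : Int) (ch : Char)
    (a b : Nat) (ha : a < 8) (hb : b < 8) :
    qmCell (if 0 ≤ r ∧ r < 8 ∧ 0 ≤ c ∧ c < 8 then
      g.modify r.toNat (fun line => line.set c.toNat ch) else g) a b
    = if r = (a : Int) ∧ c = (b : Int) then ch else qmCell g a b := by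
  have hag : a < g.length := hs.1 ▸ ha
  have hbg : b < g[a].length := by rw [hs.2 a hag]; exact hb
  unfold qmCell
  split_ifs with hg hq hq
  · -- guard holds, (r, c) = (a, b)
    have hra : r.toNat = a := by omega
    have hcb : c.toNat = b := by omega
    have h1 : a < (g.modify r.toNat (fun line => line.set c.toNat ch)).length := by
      simpa [List.length_modify] using hag
    rw [List.getD_eq_getElem _ [] h1, List.getElem_modify]
    rw [if_pos hra]
    have h2 : b < (g[a].set c.toNat ch).length := by simpa [List.length_set] using hbg
    rw [List.getD_eq_getElem _ ' ' h2, List.getElem_set, if_pos hcb]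
  · -- guard holds, (r, c) ≠ (a, b)
    have h1 : a < (g.modify r.toNat (fun line => line.set c.toNat ch)).length := by
      simpa [List.length_modify] using hag
    rw [List.getD_eq_getElem _ [] h1, List.getElem_modify]
    by_cases hra : r.toNat = a
    · rw [if_pos hra]
      have h2 : b < (g[a].set c.toNat ch).length := by simpa [List.length_set] using hbg
      rw [List.getD_eq_getElem _ ' ' h2, List.getElem_set, if_neg (by omega),
        List.getD_eq_getElem g [] hag, List.getD_eq_getElem _ ' ' hbg]
    · rw [if_neg hra, List.getD_eq_getElem g [] hag, List.getD_eq_getElem _ ' ' hbg]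
  · exact absurd hq (by omega)
  · rfl

lemma qmMark_eq (g : List (List Char)) (r c : Int) :
    qmMark g r c = (if 0 ≤ r ∧ r < 8 ∧ 0 ≤ c ∧ c < 8 then
      g.modify r.toNat (fun line => line.set c.toNat 'X') else g) := rfl

lemma qmShape_mark (g : List (List Char)) (hs : qmShape g) (r c : Int) :
    qmShape (qmMark g r c) := by rw [qmMark_eq]; exact qmShape_modify g hs r c 'X'

lemma qmCell_mark (g : List (List Char)) (hs : qmShape g) (r c : Int)
    (a b : Nat) (ha : a < 8) (hb : b < 8) :
    qmCell (qmMark g r c) a b = if r = (a : Int) ∧ c = (b : Int) then 'X' else qmCell g a b := by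
  rw [qmMark_eq]; exact qmCell_modify g hs r c 'X' a b ha hb

lemma qmShape_fold (row col : Int) (L : List Int) (g : List (List Char)) (hs : qmShape g) :
    qmShape (L.foldl (fun g i =>
      qmMark (qmMark (qmMark (qmMark g i col) row i) i (i - row + col)) (row + col - i) i) g) := by
  induction L generalizing g with
  | nil => exact hs
  | cons i L ih =>
    exact ih _ (qmShape_mark _ (qmShape_mark _ (qmShape_mark _ (qmShape_mark _ hs _ _) _ _) _ _) _ _)

lemma qmCell_fold (row col : Int) (L : List Int) (g : List (List Char)) (hs : qmShape g)
    (a b : Nat) (ha : a < 8) (hb : b < 8) :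
    qmCell (L.foldl (fun g i =>
      qmMark (qmMark (qmMark (qmMark g i col) row i) i (i - row + col)) (row + col - i) i) g) a b
    = if L.any (fun i => qmHit row col i a b) then 'X' else qmCell g a b := by
  induction L generalizing g with
  | nil => simp
  | cons i L ih =>
    have hs1 := qmShape_mark _ hs i col
    have hs2 := qmShape_mark _ hs1 row i
    have hs3 := qmShape_mark _ hs2 i (i - row + col)
    have hs4 := qmShape_mark _ hs3 (row + col - i) i
    rw [List.foldl_cons, ih _ hs4, qmCell_mark _ hs3 _ _ a b ha hb,
      qmCell_mark _ hs2 _ _ a b ha hb, qmCell_mark _ hs1 _ _ a b ha hb,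
      qmCell_mark _ hs _ _ a b ha hb, List.any_cons]
    by_cases hL : L.any (fun i => qmHit row col i a b) = true
    · simp [hL]
    · simp only [Bool.not_eq_true] at hL
      simp only [hL, Bool.or_false, Bool.false_eq_true, if_false]
      simp only [qmHit, decide_eq_true_eq]
      split_ifs <;> first | rfl | omega

lemma qmShape_replicate : qmShape (List.replicate 8 (List.replicate 8 '*')) := by
  constructor
  · rw [List.length_replicate]
  · intro a h
    rw [List.getElem_replicate, List.length_replicate]

lemma qmCell_replicate (a b : Nat) (ha : a < 8) (hb : b < 8) :
    qmCell (List.replicate 8 (List.replicate 8 '*')) a b = '*' := by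
  unfold qmCell
  rw [List.getD_eq_getElem _ [] (by simpa using ha)]
  rw [List.getElem_replicate, List.getD_eq_getElem _ ' ' (by simpa using hb),
    List.getElem_replicate]

lemma qmShape_gridB (row col : Int) : qmShape (qmGridB row col) := by
  have hsf := qmShape_fold row col (PySem.List.pyRange 0 8 1) _ qmShape_replicate
  have h := qmShape_modify _ hsf row col 'Q'
  unfold qmGridB
  split_ifs at h ⊢ with hg
  · exact h
  · exact h

-- the cell characterisation of B's finished grid
lemma qmCell_gridB (row col : Int) (a b : Nat) (ha : a < 8) (hb : b < 8) :
    qmCell (qmGridB row col) a b = qmCharB row col a b := by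
  have hR : PySem.List.pyRange 0 8 1 = ([0, 1, 2, 3, 4, 5, 6, 7] : List Int) := by decide
  have hsf := qmShape_fold row col (PySem.List.pyRange 0 8 1) _ qmShape_replicate
  have h := qmCell_modify _ hsf row col 'Q' a b ha hb
  unfold qmGridB
  rw [h, qmCell_fold row col _ _ qmShape_replicate a b ha hb, qmCell_replicate a b ha hb]
  unfold qmCharB
  rw [hR]
  split_ifs with h1 h2 h3 h3 h2 <;> first | rfl | omega

-- B's grid as an explicit table of its cells
lemma gridB_eq (row col : Int) :
    qmGridB row col
    = (List.range 8).map (fun a => (List.range 8).map (fun b => qmCharB row col a b)) := by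
  have hs := qmShape_gridB row col
  refine List.ext_getElem ?_ ?_
  · rw [hs.1]; simp
  · intro a h1 h2
    have ha : a < 8 := by have h1' := h1; rw [hs.1] at h1'; exact h1'
    rw [List.getElem_map, List.getElem_range]
    refine List.ext_getElem ?_ ?_
    · rw [hs.2 a h1]; simp
    · intro b hb1 hb2
      have hb : b < 8 := by have hb1' := hb1; rw [hs.2 a h1] at hb1'; exact hb1'
      rw [List.getElem_map, List.getElem_range]
      have hcell := qmCell_gridB row col a b ha hb
      unfold qmCell at hcell
      rwa [List.getD_eq_getElem _ [] h1, List.getD_eq_getElem _ ' ' hb1] at hcell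

-- B's marking loop reaches cell (a, b) exactly when A's closed-form test marks it
lemma qmAny_iff (row col : Int) (a b : Nat) (ha : a < 8) (hb : b < 8) :
    (([0, 1, 2, 3, 4, 5, 6, 7] : List Int).any (fun i => qmHit row col i a b) = true)
    ↔ (row = (a : Int) ∨ col = (b : Int)
        ∨ ((a : Int) - row).natAbs = ((b : Int) - col).natAbs) := by
  rw [List.any_eq_true]
  constructor
  · rintro ⟨i, hmem, hhit⟩
    simp only [qmHit, decide_eq_true_eq] at hhit
    omega
  · intro h
    have hmem : ∀ (k : Nat), k < 8 → ((k : Int) ∈ ([0, 1, 2, 3, 4, 5, 6, 7] : List Int)) := by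
      intro k hk
      interval_cases k <;> simp
    rcases h with h | h | h
    · exact ⟨(b : Int), hmem b hb, by simp only [qmHit, decide_eq_true_eq, and_true]; omega⟩
    · exact ⟨(a : Int), hmem a ha, by simp only [qmHit, decide_eq_true_eq, true_and]; omega⟩
    · rcases (show (a : Int) - row = (b : Int) - col ∨ (a : Int) - row = -((b : Int) - col)
        from by omega) with h4 | h4
      · exact ⟨(a : Int), hmem a ha, by simp only [qmHit, decide_eq_true_eq, true_and]; omega⟩
      · exact ⟨(b : Int), hmem b hb, by simp only [qmHit, decide_eq_true_eq, and_true]; omega⟩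

-- A's cell character equals B's, for every board cell
lemma qmChar_eq (row col r c : Int) (a b : Nat) (hra : r = (a : Int)) (hcb : c = (b : Int))
    (ha : a < 8) (hb : b < 8) :
    qmCharA row col r c = qmCharB row col a b := by
  have hAny := qmAny_iff row col a b ha hb
  unfold qmCharA qmCharB
  by_cases h1 : r = row ∧ c = col
  · rw [if_pos h1, if_pos (show 0 ≤ row ∧ row < 8 ∧ 0 ≤ col ∧ col < 8 ∧ row = (a : Int)
      ∧ col = (b : Int) from by omega)]
  · rw [if_neg h1, if_neg (show ¬(0 ≤ row ∧ row < 8 ∧ 0 ≤ col ∧ col < 8 ∧ row = (a : Int)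
      ∧ col = (b : Int)) from by omega)]
    by_cases h2 : r = row ∨ c = col
    · rw [if_pos h2, if_pos (hAny.mpr (by omega))]
    · rw [if_neg h2]
      by_cases h3 : (r - row).natAbs = (c - col).natAbs
      · rw [if_pos h3, if_pos (hAny.mpr (by omega))]
      · rw [if_neg h3, if_neg (show ¬(([0, 1, 2, 3, 4, 5, 6, 7] : List Int).any
          (fun i => qmHit row col i a b) = true) from fun hh => by
            have h4 := hAny.mp hh; omega)]

-- joining the table rows with '\n' is a flatMap with conditional separators
lemma qmJoin_eq (f : Nat → List Char) :
    PySem.Chars.join ['\n'] ((List.range 8).map f)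
    = (List.range 8).flatMap (fun a => f a ++ if a ≠ 7 then ['\n'] else []) := by
  have h8 : List.range 8 = [0, 1, 2, 3, 4, 5, 6, 7] := by decide
  simp [h8, PySem.Chars.join, List.intercalate, List.intersperse]

-- the rendered strings agree for any parsed 0 ≤ row, 0 ≤ col
lemma render_eq (row col : Int) :
    ((PySem.List.pyRange 0 8 1).foldl (fun result r =>
      let result := (PySem.List.pyRange 0 8 1).foldl (fun result c =>
        if r = row ∧ c = col then result ++ ['Q']
        else if r = row ∨ c = col then result ++ ['X']
        else if (r - row).natAbs = (c - col).natAbs then result ++ ['X']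
        else result ++ ['*']) result
      if r ≠ 7 then result ++ ['\n'] else result) ([] : List Char)) =
    PySem.Chars.join ['\n'] (qmGridB row col) := by
  rw [gridB_eq row col, qmJoin_eq]
  have hinner : ∀ (res : List Char) (r : Int),
      ((PySem.List.pyRange 0 8 1).foldl (fun result c =>
        if r = row ∧ c = col then result ++ ['Q']
        else if r = row ∨ c = col then result ++ ['X']
        else if (r - row).natAbs = (c - col).natAbs then result ++ ['X']
        else result ++ ['*']) res)
      = res ++ (PySem.List.pyRange 0 8 1).map (fun c => qmCharA row col r c) := by
    intro res r
    have hfun : (fun (result : List Char) (c : Int) =>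
        if r = row ∧ c = col then result ++ ['Q']
        else if r = row ∨ c = col then result ++ ['X']
        else if (r - row).natAbs = (c - col).natAbs then result ++ ['X']
        else result ++ ['*'])
        = (fun (result : List Char) (c : Int) => result ++ [qmCharA row col r c]) := by
      funext result c
      unfold qmCharA
      split_ifs <;> rfl
    rw [hfun, PySem.List.foldl_append_eq_flatMap, ← List.map_eq_flatMap]
  have houter : (fun (result : List Char) (r : Int) =>
      let result := (PySem.List.pyRange 0 8 1).foldl (fun result c =>
        if r = row ∧ c = col then result ++ ['Q']
        else if r = row ∨ c = col then result ++ ['X']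
        else if (r - row).natAbs = (c - col).natAbs then result ++ ['X']
        else result ++ ['*']) result
      if r ≠ 7 then result ++ ['\n'] else result)
      = (fun (result : List Char) (r : Int) => result ++
          ((PySem.List.pyRange 0 8 1).map (fun c => qmCharA row col r c)
            ++ if r ≠ 7 then ['\n'] else [])) := by
    funext result r
    simp only [hinner]
    split_ifs <;> simp
  rw [houter, PySem.List.foldl_append_eq_flatMap, List.nil_append]
  have hR : PySem.List.pyRange 0 8 1 = (List.range 8).map (Nat.cast : Nat → Int) := by decide
  rw [hR, List.flatMap_map]
  refine List.flatMap_congr ?_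
  intro a haMem
  have ha : a < 8 := List.mem_range.mp haMem
  try simp only [Function.comp_apply]
  have h1 : ((List.range 8).map (Nat.cast : Nat → Int)).map (fun c => qmCharA row col (a : Int) c)
      = (List.range 8).map (fun b => qmCharB row col a b) := by
    rw [List.map_map]
    refine List.map_congr_left ?_
    intro b hbMem
    try simp only [Function.comp_apply]
    exact qmChar_eq row col (a : Int) (b : Int) a b rfl rfl ha (List.mem_range.mp hbMem)
  have h2 : (if (a : Int) ≠ 7 then (['\n'] : List Char) else [])
      = (if a ≠ 7 then ['\n'] else []) := by
    by_cases h7 : a = 7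
    · subst h7; norm_num
    · rw [if_pos (by exact_mod_cast h7), if_pos h7]
  rw [h1, h2]

-- A's two parse loops compute exactly B's (col, row)
lemma qmColA_eq (cs : List Char) (col : Int) :
    qmColA cs col = col + (((cs.findIdx? (fun ch => ch = 'Q')).getD cs.length : Nat) : Int) := by
  induction cs generalizing col with
  | nil => simp [qmColA]
  | cons c cs ih =>
    by_cases h : c = 'Q' <;> simp [qmColA, h, List.findIdx?_cons, ih]
    · cases hf : cs.findIdx? (fun ch => ch = 'Q') <;> simp <;> omega

lemma qmFindA_eq (lines : List String) (row0 : Int) :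
    qmFindA lines 0 row0 =
      ((match PySem.List.pyGet? lines
          ((((lines.findIdx? (fun line => line ≠ "********")).getD lines.length : Nat)) : Int) with
        | some line => (((line.toList.findIdx? (fun ch => ch = 'Q')).getD line.toList.length : Nat) : Int)
        | none => 0),
       row0 + (((lines.findIdx? (fun line => line ≠ "********")).getD lines.length : Nat) : Int)) := by
  induction lines generalizing row0 with
  | nil => simp [qmFindA, PySem.List.pyGet?]
  | cons line rest ih =>
    by_cases h : line = "********"
    · rw [show qmFindA (line :: rest) 0 row0 = qmFindA rest 0 (row0 + 1) from by
        simp [qmFindA, h]]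
      rw [ih (row0 + 1)]
      have hfi : (line :: rest).findIdx? (fun line => line ≠ "********")
          = (rest.findIdx? (fun line => line ≠ "********")).map (· + 1) := by
        simp [List.findIdx?_cons, h]
      rw [hfi]
      cases hf : rest.findIdx? (fun line => line ≠ "********") with
      | none =>
        simp only [Option.map_none, Option.getD_none, List.length_cons]
        rw [Prod.mk.injEq]
        refine ⟨?_, by push_cast; ring⟩
        rw [show (((rest.length + 1 : Nat)) : Int) = ((rest.length : Nat) : Int) + 1 by
          push_cast; ring]
        rw [PySem.List.pyGet?_cons_succ]
      | some k =>
        simp only [Option.map_some, Option.getD_some]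
        rw [Prod.mk.injEq]
        refine ⟨?_, by push_cast; ring⟩
        rw [show (((k + 1 : Nat)) : Int) = ((k : Nat) : Int) + 1 by push_cast; ring]
        rw [PySem.List.pyGet?_cons_succ]
    · rw [show qmFindA (line :: rest) 0 row0 = (qmColA line.toList 0, row0) from by
        simp [qmFindA, h]]
      have hfi : (line :: rest).findIdx? (fun line => line ≠ "********") = some 0 := by
        simp [List.findIdx?_cons, h]
      rw [hfi]
      simp only [Option.getD_some, Nat.cast_zero]
      rw [PySem.List.pyGet?_zero_cons]
      rw [Prod.mk.injEq]
      exact ⟨by rw [qmColA_eq line.toList 0]; ring, by ring⟩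

-- ===== VERDICT (by name: the statement is the Claim_ definition above) =====
theorem queenmoves_spec : Claim_equal_queenmoves := by
  intro board _
  simp only [Spec_queenmoves, queenmoves, queenmoves_alt, qmFindA_eq (PySem.Str.split₀ board) 0,
    zero_add]
  exact congrArg String.ofList (render_eq _ _)
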